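-- pv_equiv track=rewrite | github.com/santoshrachakonda7/cp | 09-nearestbusstop-Python/nearestbusstop.py | fun_nearestbusstop
-- ===== SOURCE A (Python) =====
-- def fun_nearestbusstop(street):
-- 	for i in range(0,11):
--
-- 		n = i*8
-- 		s = (i+1)*8
-- 		if(abs(street-n) <=8 and abs(street-s) <= 8):
-- 			if((abs(street-n) < abs(street-s)) or (abs(street-n) == abs(street-s))):
-- 				return n
-- 			elif(abs(street-n) > abs(street-s)):
-- 				return s
-- 		else:
-- 			i=i+1
-- ===== SOURCE B (Python) =====
-- def fun_nearestbusstop(street):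
--     if 0 <= street <= 88:
--         return (street + 3) // 8 * 8
--     return None
-- ===== Notes on version B (the rewrite author's own statement) =====
-- stated objective: simpler
-- what changed: Replaced the eleven-step window scan with a single range guard plus one closed-form floor-division rounding expression (ties round toward the lower stop).
import Mathlib
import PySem

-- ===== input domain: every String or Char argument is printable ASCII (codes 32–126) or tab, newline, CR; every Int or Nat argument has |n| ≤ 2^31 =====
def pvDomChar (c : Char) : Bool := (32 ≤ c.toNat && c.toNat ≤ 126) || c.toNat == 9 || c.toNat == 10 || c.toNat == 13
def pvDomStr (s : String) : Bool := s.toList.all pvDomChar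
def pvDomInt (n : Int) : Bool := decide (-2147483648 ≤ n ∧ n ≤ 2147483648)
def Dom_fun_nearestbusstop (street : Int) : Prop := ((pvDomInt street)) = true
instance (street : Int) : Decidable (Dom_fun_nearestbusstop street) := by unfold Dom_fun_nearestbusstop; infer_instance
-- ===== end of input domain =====

-- B replaces A's eleven-step window scan with a range guard plus one closed-form floor-division rounding (simpler).


-- ===== PORT A =====
-- Loop of A: the first window [8i, 8i+8] containing street decides; none otherwise.
def pvLoopA (street : Int) : List Int → Option Int
  | [] => none
  | i :: rest =>
    let n := i * 8
    let s := (i + 1) * 8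
    if |street - n| ≤ 8 ∧ |street - s| ≤ 8 then
      if |street - n| < |street - s| ∨ |street - n| = |street - s| then some n
      else if |street - n| > |street - s| then some s
      else pvLoopA street rest
    else pvLoopA street rest   -- Python's 'else: i=i+1' is a no-op; the loop just continues

def fun_nearestbusstop (street : Int) : Option Int :=
  pvLoopA street (PySem.List.pyRange 0 11 1)

-- ===== PORT B =====
-- B: range guard + closed-form nearest multiple of 8 with ties rounding down.
def fun_nearestbusstop_alt (street : Int) : Option Int :=
  if 0 ≤ street ∧ street ≤ 88 then some (PySem.Int.floordiv (street + 3) 8 * 8)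
  else none

-- ===== PRECONDITION & SPEC =====
def Spec_fun_nearestbusstop (street : Int) (out : Option Int) : Prop := out = fun_nearestbusstop_alt street
instance (street : Int) (out : Option Int) : Decidable (Spec_fun_nearestbusstop street out) := by unfold Spec_fun_nearestbusstop; infer_instance

-- ===== CLAIM (what is proved, stated in full; the proofs are below) =====
def Claim_equal_fun_nearestbusstop : Prop := ∀ (street : Int), Dom_fun_nearestbusstop street → Spec_fun_nearestbusstop street (fun_nearestbusstop street)

-- ===== LEMMAS AND PROOFS =====
theorem pvLoopA_cons_skip (street i : Int) (rest : List Int)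
    (h : street < i * 8 ∨ i * 8 + 8 < street) :
    pvLoopA street (i :: rest) = pvLoopA street rest := by
  rw [pvLoopA]
  rw [if_neg]
  rw [not_and_or, abs_le, abs_le]
  omega

theorem pvRange11 : PySem.List.pyRange 0 11 1 = [0,1,2,3,4,5,6,7,8,9,10] := by decide

-- ===== VERDICT (by name: the statement is the Claim_ definition above) =====
theorem fun_nearestbusstop_spec : Claim_equal_fun_nearestbusstop := by
  intro street _
  unfold Spec_fun_nearestbusstop
  by_cases h : 0 ≤ street ∧ street ≤ 88
  · obtain ⟨h1, h2⟩ := h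
    interval_cases street <;> decide
  · rw [fun_nearestbusstop_alt, if_neg h, fun_nearestbusstop, pvRange11]
    repeat rw [pvLoopA_cons_skip _ _ _ (by omega)]
    rfl
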